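-- pv_equiv track=rewrite | github.com/UniqMartin/adventofcode-2016 | day-21/main.py | swap_by_letter
-- ===== SOURCE A (Python) =====
-- def swap_by_letter(password, _inverse, letter1, letter2):
--     """Swap all occurrences of the two given letters in the string."""
--     indices1 = [i for i, l in enumerate(password) if l == letter1]
--     indices2 = [i for i, l in enumerate(password) if l == letter2]
--     for i in indices1:
--         password[i] = letter2
--     for i in indices2:
--         password[i] = letter1
--     return password
-- ===== SOURCE B (Python) =====
-- def swap_by_letter(password, _inverse, letter1, letter2):
--     """Swap all occurrences of the two given letters in the string."""
--     for i, l in enumerate(password):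
--         if l == letter1:
--             password[i] = letter2
--         elif l == letter2:
--             password[i] = letter1
--     return password
-- ===== Notes on version B (the rewrite author's own statement) =====
-- stated objective: simpler
-- what changed: Replaces the two index-list comprehensions plus two separate write-back loops with one in-place enumerate pass that swaps each element via an exclusive if/elif.
import Mathlib
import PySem

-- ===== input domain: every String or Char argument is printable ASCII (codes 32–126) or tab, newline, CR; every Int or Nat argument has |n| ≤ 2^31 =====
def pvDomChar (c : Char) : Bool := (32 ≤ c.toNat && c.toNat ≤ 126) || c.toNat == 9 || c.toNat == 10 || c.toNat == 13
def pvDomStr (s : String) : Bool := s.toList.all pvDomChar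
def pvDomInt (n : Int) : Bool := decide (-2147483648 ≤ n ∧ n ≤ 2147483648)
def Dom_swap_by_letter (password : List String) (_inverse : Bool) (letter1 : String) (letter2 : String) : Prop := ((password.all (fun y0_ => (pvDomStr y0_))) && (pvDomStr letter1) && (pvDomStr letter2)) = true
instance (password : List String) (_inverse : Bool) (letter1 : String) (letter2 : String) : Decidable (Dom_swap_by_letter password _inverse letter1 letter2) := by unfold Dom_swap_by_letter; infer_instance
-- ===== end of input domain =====

-- B replaces A's two index-list comprehensions plus two write-back loops by one in-place
-- enumerate pass with an exclusive if/elif (simpler); return-value equivalence (both mutate in place identically).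


-- ===== PORT A =====
def swap_by_letter (password : List String) (_inverse : Bool) (letter1 : String) (letter2 : String) : List String :=
  let indices1 := ((PySem.List.enumerate password 0).filter (fun p => p.2 == letter1)).map (·.1)
  let indices2 := ((PySem.List.enumerate password 0).filter (fun p => p.2 == letter2)).map (·.1)
  let pw1 := indices1.foldl (fun pw i => PySem.List.pySetD pw i letter2) password
  indices2.foldl (fun pw i => PySem.List.pySetD pw i letter1) pw1

-- ===== PORT B =====
def swap_by_letter_alt (password : List String) (_inverse : Bool) (letter1 : String) (letter2 : String) : List String :=
  (PySem.List.enumerate password 0).foldl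
    (fun pw p =>
      if p.2 == letter1 then PySem.List.pySetD pw p.1 letter2
      else if p.2 == letter2 then PySem.List.pySetD pw p.1 letter1
      else pw)
    password

-- ===== PRECONDITION & SPEC =====
def Spec_swap_by_letter (password : List String) (_inverse : Bool) (letter1 : String) (letter2 : String) (out : List String) : Prop := out = swap_by_letter_alt password _inverse letter1 letter2
instance (password : List String) (_inverse : Bool) (letter1 : String) (letter2 : String) (out : List String) : Decidable (Spec_swap_by_letter password _inverse letter1 letter2 out) := by unfold Spec_swap_by_letter; infer_instance

-- ===== CLAIM (what is proved, stated in full; the proofs are below) =====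
def Claim_equal_swap_by_letter : Prop := ∀ (password : List String) (_inverse : Bool) (letter1 : String) (letter2 : String), Dom_swap_by_letter password _inverse letter1 letter2 → Spec_swap_by_letter password _inverse letter1 letter2 (swap_by_letter password _inverse letter1 letter2)

-- ===== LEMMAS AND PROOFS =====

-- length is preserved by a fold of in-range writes
lemma len_foldl_setD (is : List Int) (pw : List String) (v : String) :
    (is.foldl (fun pw j => PySem.List.pySetD pw j v) pw).length = pw.length := by
  induction is generalizing pw with
  | nil => rfl
  | cons j is ih => simp [List.foldl, ih, PySem.List.length_pySetD]

-- pointwise value of a fold of writes of the same value v at nonnegative indices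
lemma getElem?_foldl_setD (is : List Int) (pw : List String) (v : String) (i : Nat)
    (hnn : ∀ j ∈ is, 0 ≤ j) :
    (is.foldl (fun pw j => PySem.List.pySetD pw j v) pw)[i]? =
      if ((i : Int) ∈ is ∧ i < pw.length) then some v else pw[i]? := by
  induction is generalizing pw with
  | nil => simp
  | cons j is ih =>
    have hj : 0 ≤ j := hnn j (by simp)
    have hrec := ih (PySem.List.pySetD pw j v) (fun k hk => hnn k (by simp [hk]))
    simp only [List.foldl_cons]
    rw [hrec, PySem.List.pySetD_of_nonneg _ _ hj]
    simp only [List.length_set]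
    rcases Int.eq_ofNat_of_zero_le hj with ⟨n, rfl⟩
    by_cases hlt : i < pw.length
    · by_cases hmem : ((i : Int)) ∈ is
      · simp [hmem, hlt]
      · by_cases hij : n = i
        · subst hij
          simp [hmem, hlt]
        · have h4 : i ≠ n := fun h => hij h.symm
          simp [hmem, hlt, h4, List.getElem_set_ne (by omega : n ≠ i)]
    · simp [hlt]


-- membership in A's index lists
lemma mem_indices (xs : List String) (c : String) (i : Nat) :
    ((i : Int) ∈ (((PySem.List.enumerate xs 0).filter (fun p => p.2 == c)).map (·.1))) ↔
      (∃ h : i < xs.length, xs[i] = c) := by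
  simp only [List.mem_map, List.mem_filter, PySem.List.mem_enumerate_iff]
  constructor
  · rintro ⟨p, ⟨⟨k, hk, rfl⟩, hc⟩, hfst⟩
    simp at hfst hc
    have : k = i := by omega
    subst this
    exact ⟨hk, hc⟩
  · rintro ⟨h, hc⟩
    exact ⟨((i : Int), xs[i]), ⟨⟨i, h, by simp⟩, by simp [hc]⟩, rfl⟩

lemma nonneg_indices (xs : List String) (c : String) :
    ∀ j ∈ (((PySem.List.enumerate xs 0).filter (fun p => p.2 == c)).map (·.1)), 0 ≤ j := by
  intro j hj
  simp only [List.mem_map, List.mem_filter, PySem.List.mem_enumerate_iff] at hj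
  obtain ⟨p, ⟨⟨k, hk, rfl⟩, _⟩, hfst⟩ := hj
  simp at hfst
  omega

-- B's single pass, generalized over an already-processed prefix
lemma foldB (letter1 letter2 : String) (xs pre : List String) :
    (PySem.List.enumerate xs (pre.length : Int)).foldl
      (fun pw p =>
        if p.2 == letter1 then PySem.List.pySetD pw p.1 letter2
        else if p.2 == letter2 then PySem.List.pySetD pw p.1 letter1
        else pw)
      (pre ++ xs)
    = pre ++ xs.map (fun l => if l == letter1 then letter2 else if l == letter2 then letter1 else l) := by
  induction xs generalizing pre with
  | nil => simp [PySem.List.enumerate_nil]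
  | cons x xs ih =>
    rw [PySem.List.enumerate_cons, List.foldl_cons]
    have key : (if (((pre.length : Int), x).2 == letter1) = true then
          PySem.List.pySetD (pre ++ x :: xs) (((pre.length : Int), x).1) letter2
        else if (((pre.length : Int), x).2 == letter2) = true then
          PySem.List.pySetD (pre ++ x :: xs) (((pre.length : Int), x).1) letter1
        else pre ++ x :: xs)
        = (pre ++ [if x == letter1 then letter2 else if x == letter2 then letter1 else x]) ++ xs := by
      by_cases h1 : x == letter1 <;> by_cases h2 : x == letter2 <;>
        simp [h1, h2, PySem.List.pySetD_natCast]
    rw [key]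
    have hlen : ((pre.length : Int) + 1)
        = (((pre ++ [if x == letter1 then letter2 else if x == letter2 then letter1 else x]).length : Nat) : Int) := by
      simp
    rw [hlen, ih]
    simp

lemma altB (password : List String) (_inverse : Bool) (letter1 letter2 : String) :
    swap_by_letter_alt password _inverse letter1 letter2
      = password.map (fun l => if l == letter1 then letter2 else if l == letter2 then letter1 else l) := by
  have := foldB letter1 letter2 password []
  simpa [swap_by_letter_alt] using this

-- ===== VERDICT (by name: the statement is the Claim_ definition above) =====
theorem swap_by_letter_spec : Claim_equal_swap_by_letter := by
  intro password _inverse letter1 letter2 _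
  unfold Spec_swap_by_letter
  rw [altB]
  unfold swap_by_letter
  apply List.ext_getElem?
  intro i
  rw [getElem?_foldl_setD _ _ _ _ (nonneg_indices _ _),
      getElem?_foldl_setD _ _ _ _ (nonneg_indices _ _)]
  rw [len_foldl_setD]
  simp only [mem_indices]
  by_cases hlt : i < password.length
  · by_cases h2 : password[i] = letter2
    · by_cases h1 : password[i] = letter1
      · simp_all
      · simp [hlt, h2]
        exact fun h => h.symm
    · by_cases h1 : password[i] = letter1
      · simp [hlt, h1]
      · simp [hlt, h1, h2]
  · rw [if_neg (by tauto), if_neg (by tauto), List.getElem?_eq_none (by omega),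
        List.getElem?_eq_none (by simp; omega)]
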